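-- pv_equiv track=rewrite | github.com/networkingguru/TEREDACTA | teredacta/unob.py | parse_boolean_search
-- ===== SOURCE A (Python) =====
-- def parse_boolean_search(query: str) -> list[tuple[str, str]]:
--     """Parse a search query with AND/OR operators and quoted phrases.
--
--     Returns list of (term, operator) tuples.  The operator indicates how
--     this term connects to the *previous* term.  The first term always
--     has operator "AND".
--
--     Examples:
--         "maxwell"             -> [("maxwell", "AND")]
--         "maxwell AND epstein" -> [("maxwell", "AND"), ("epstein", "AND")]
--         "maxwell OR epstein"  -> [("maxwell", "AND"), ("epstein", "OR")]
--         '"palm beach" AND maxwell' -> [("palm beach", "AND"), ("maxwell", "AND")]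
--     """
--     if not query or not query.strip():
--         return []
--
--     tokens: list[str] = []
--     i = 0
--     q = query.strip()
--     while i < len(q):
--         if q[i] == '"':
--             # Quoted phrase
--             end = q.find('"', i + 1)
--             if end == -1:
--                 end = len(q)
--             tokens.append(q[i + 1:end])
--             i = end + 1
--         elif q[i] == ' ':
--             i += 1
--         else:
--             end = i
--             while end < len(q) and q[end] != ' ' and q[end] != '"':
--                 end += 1
--             tokens.append(q[i:end])
--             i = end
--
--     # Build (term, operator) pairs
--     result: list[tuple[str, str]] = []
--     pending_op = "AND"
--     for tok in tokens:
--         upper = tok.upper()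
--         if upper == "AND":
--             pending_op = "AND"
--         elif upper == "OR":
--             pending_op = "OR"
--         elif tok:  # skip empty tokens (e.g. from empty quotes "")
--             result.append((tok, pending_op))
--             pending_op = "AND"  # default between adjacent terms
--
--     return result
-- ===== SOURCE B (Python) =====
-- def parse_boolean_search(query: str) -> list[tuple[str, str]]:
--     """Split-based reimplementation: segments between '"' alternate
--     unquoted/quoted; unquoted segments split on spaces into words,
--     quoted segments are taken verbatim as phrases."""
--     q = query.strip()
--     if not q:
--         return []
--     result: list[tuple[str, str]] = []
--     pending = "AND"
--     quoted = False
--     for seg in q.split('"'):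
--         for tok in ([seg] if quoted else seg.split(' ')):
--             u = tok.upper()
--             if u == "AND":
--                 pending = "AND"
--             elif u == "OR":
--                 pending = "OR"
--             elif tok:
--                 result.append((tok, pending))
--                 pending = "AND"
--         quoted = not quoted
--     return result
-- ===== Notes on version B (the rewrite author's own statement) =====
-- stated objective: faster
-- what changed: Replaces A's manual index-walking tokenizer (char-by-char scan with find and slices) by split-based tokenization: splitting on the double-quote character yields alternately unquoted/quoted segments, quoted ones are phrases verbatim and unquoted ones are split on spaces; the (term, operator) pair-building pass is kept.
import Mathlib
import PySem

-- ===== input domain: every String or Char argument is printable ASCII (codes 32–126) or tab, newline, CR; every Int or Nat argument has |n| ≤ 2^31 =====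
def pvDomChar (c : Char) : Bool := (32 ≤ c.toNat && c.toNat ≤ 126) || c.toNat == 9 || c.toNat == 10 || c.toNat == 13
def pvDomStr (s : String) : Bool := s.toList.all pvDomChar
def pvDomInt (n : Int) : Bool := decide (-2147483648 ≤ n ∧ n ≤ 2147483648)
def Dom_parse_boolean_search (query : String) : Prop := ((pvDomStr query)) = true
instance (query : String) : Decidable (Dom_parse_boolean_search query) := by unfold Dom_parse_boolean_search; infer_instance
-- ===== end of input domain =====

-- B replaces A's manual index-walking tokenizer by a split('"')-based one (segments alternate
-- unquoted/quoted; unquoted segments split on ' '); the pair-building loop body is shared.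
-- Objective: faster (measured: C-implemented str.split replaces the per-character Python loop).

-- ===== PORT A =====

-- Shared pair-building step: the body of the `for tok in tokens` loop (identical in A and B).
def applyTok (st : String × List (String × String)) (tok : String) :
    String × List (String × String) :=
  let upper := PySem.Str.upper tok
  if upper = "AND" then ("AND", st.2)
  else if upper = "OR" then ("OR", st.2)
  else if tok ≠ "" then ("AND", st.2 ++ [(tok, st.1)])
  else st

-- A's while-loop tokenizer, transliterated over the character list: `q.find('"', i+1)` followed
-- by the slice `q[i+1:end]` is exactly the takeWhile/dropWhile split at the next '"'; the inner
-- `while end < len(q) and q[end] != ' ' and q[end] != '"'` scan is the takeWhile/dropWhile split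
-- at the next ' ' or '"'.
def tokA : List Char → List String
  | [] => []
  | c :: rest =>
    if c = '"' then
      String.ofList (rest.takeWhile (fun x => x != '"')) ::
        tokA ((rest.dropWhile (fun x => x != '"')).drop 1)
    else if c = ' ' then
      tokA rest
    else
      String.ofList (c :: rest.takeWhile (fun x => x != ' ' && x != '"')) ::
        tokA (rest.dropWhile (fun x => x != ' ' && x != '"'))
  termination_by l => l.length
  decreasing_by
  · have h1 := List.length_dropWhile_le (fun x => x != '"') rest
    simp; omega
  · simp
  · have h1 := List.length_dropWhile_le (fun x => x != ' ' && x != '"') rest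
    simp; omega

def parse_boolean_search (query : String) : List (String × String) :=
  if query = "" ∨ PySem.Str.strip query = "" then []
  else
    ((tokA (PySem.Str.strip query).toList).foldl applyTok ("AND", [])).2

-- ===== PORT B =====

-- Exact port of Python's str.split(sep) for a one-character separator: the piece before the
-- first sep, then recursively the pieces of what follows it (empty pieces kept).
def pySplitChar (sep : Char) (l : List Char) : List (List Char) :=
  match h : l.dropWhile (fun x => x != sep) with
  | [] => [l.takeWhile (fun x => x != sep)]
  | _ :: rest => l.takeWhile (fun x => x != sep) :: pySplitChar sep rest
  termination_by l.length
  decreasing_by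
    have h1 := List.length_dropWhile_le (fun x => x != sep) l
    rw [h] at h1; simp at h1; omega

-- tokens contributed by one segment: quoted segments verbatim, unquoted ones split on ' '
def segToks (quoted : Bool) (seg : List Char) : List String :=
  if quoted then [String.ofList seg] else (pySplitChar ' ' seg).map String.ofList

def parse_boolean_search_alt (query : String) : List (String × String) :=
  let q := PySem.Str.strip query
  if q = "" then []
  else
    (((pySplitChar '"' q.toList).foldl
        (fun (st : (String × List (String × String)) × Bool) seg =>
          ((segToks st.2 seg).foldl applyTok st.1, !st.2))
        (("AND", []), false)).1).2

-- ===== PRECONDITION & SPEC =====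
def Spec_parse_boolean_search (query : String) (out : List (String × String)) : Prop := out = parse_boolean_search_alt query
instance (query : String) (out : List (String × String)) : Decidable (Spec_parse_boolean_search query out) := by unfold Spec_parse_boolean_search; infer_instance

-- ===== CLAIM (what is proved, stated in full; the proofs are below) =====
def Claim_equal_parse_boolean_search : Prop := ∀ (query : String), Dom_parse_boolean_search query → Spec_parse_boolean_search query (parse_boolean_search query)

-- ===== LEMMAS AND PROOFS =====


-- token stream of B: concatenation of the per-segment tokens, with the quoted flag alternating
def toksSeg (quoted : Bool) : List (List Char) → List String
  | [] => []
  | s :: rest => segToks quoted s ++ toksSeg (!quoted) rest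

-- B's segment fold is the applyTok-fold over its token stream
theorem foldB_eq (segs : List (List Char)) (quoted : Bool)
    (st : String × List (String × String)) :
    (segs.foldl
        (fun (st : (String × List (String × String)) × Bool) seg =>
          ((segToks st.2 seg).foldl applyTok st.1, !st.2))
        (st, quoted)).1
      = (toksSeg quoted segs).foldl applyTok st := by
  induction segs generalizing quoted st with
  | nil => rfl
  | cons s rest ih =>
      simp only [List.foldl_cons, toksSeg, List.foldl_append]
      exact ih _ _

theorem applyTok_empty (st : String × List (String × String)) : applyTok st "" = st := by
  have h : PySem.Str.upper "" = "" := by decide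
  simp [applyTok, h]

-- empty tokens are no-ops of the fold
theorem foldl_filter_ne (ts : List String) (st : String × List (String × String)) :
    (ts.filter (fun t => t != "")).foldl applyTok st = ts.foldl applyTok st := by
  induction ts generalizing st with
  | nil => rfl
  | cons t rest ih =>
      by_cases h : t = ""
      · subst h; simpa [applyTok_empty] using ih st
      · simp [List.filter_cons, h, ih]

def filtNE (ts : List String) : List String := ts.filter (fun t => t != "")

-- the tail of pySplitChar: the pieces after the first separator (empty if there is none)
def spTail (sep : Char) (l : List Char) : List (List Char) :=
  match l.dropWhile (fun x => x != sep) with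
  | [] => []
  | _ :: rest => pySplitChar sep rest

theorem sp_eq (sep : Char) (l : List Char) :
    pySplitChar sep l = l.takeWhile (fun x => x != sep) :: spTail sep l := by
  unfold pySplitChar spTail
  cases h : l.dropWhile (fun x => x != sep) <;> simp

theorem spTail_cons_ne (sep c : Char) (t : List Char) (h : c ≠ sep) :
    spTail sep (c :: t) = spTail sep t := by
  unfold spTail
  rw [List.dropWhile_cons_of_pos (by simp [h])]

theorem spTail_cons_self (sep : Char) (t : List Char) :
    spTail sep (sep :: t) = pySplitChar sep t := by
  unfold spTail
  rw [List.dropWhile_cons_of_neg (by simp)]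

theorem takeWhile_cons_ne (sep c : Char) (t : List Char) (h : c ≠ sep) :
    (c :: t).takeWhile (fun x => x != sep) = c :: t.takeWhile (fun x => x != sep) := by
  rw [List.takeWhile_cons_of_pos (by simp [h])]

theorem sp_cons_self (sep : Char) (t : List Char) :
    pySplitChar sep (sep :: t) = [] :: pySplitChar sep t := by
  rw [sp_eq, spTail_cons_self, List.takeWhile_cons_of_neg (by simp)]

-- token stream of B, from an arbitrary suffix l of the query
def gTok (l : List Char) : List String := toksSeg false (pySplitChar '"' l)

theorem mk_nil_bne : (String.ofList ([] : List Char) != "") = false := by decide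

theorem gTok_quote (r : List Char) :
    filtNE (gTok ('"' :: r)) = filtNE (toksSeg true (pySplitChar '"' r)) := by
  unfold gTok
  rw [sp_cons_self]
  simp [toksSeg, segToks, filtNE, sp_eq ' ' ([] : List Char), spTail, List.filter_cons, mk_nil_bne]

theorem toksSeg_true_sp (r : List Char) :
    toksSeg true (pySplitChar '"' r)
      = String.ofList (r.takeWhile (fun x => x != '"')) :: toksSeg false (spTail '"' r) := by
  rw [sp_eq]; simp [toksSeg, segToks]

theorem gTok_space (r : List Char) :
    filtNE (gTok (' ' :: r)) = filtNE (gTok r) := by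
  unfold gTok
  rw [sp_eq '"' (' ' :: r), spTail_cons_ne _ _ _ (by decide),
      takeWhile_cons_ne _ _ _ (by decide), sp_eq '"' r]
  simp only [toksSeg, segToks, if_neg (by decide : ¬ (false = true)), sp_cons_self]
  simp [filtNE, List.filter_cons, mk_nil_bne, List.filter_append]

theorem mk_cons_bne (c : Char) (xs : List Char) :
    (String.ofList (c :: xs) != "") = true := by
  rw [bne_iff_ne]
  intro h
  rw [show ("" : String) = String.ofList [] from rfl, String.ofList_inj] at h
  cases h

-- splitting the token stream of the rest of the query at the end of the current word:
-- what B's stream contributes after the current word equals its stream of the suffix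
-- of the query that starts at the word's terminator
theorem tailsplit (rest : List Char) :
    filtNE (gTok (rest.dropWhile (fun x => x != ' ' && x != '"')))
      = filtNE (List.map String.ofList (spTail ' ' (rest.takeWhile (fun x => x != '"')))
          ++ toksSeg true (spTail '"' rest)) := by
  induction rest with
  | nil =>
      have e1 : ∀ c : Char, spTail c ([] : List Char) = [] := fun _ => rfl
      simp [gTok, sp_eq, e1, toksSeg, segToks, filtNE, mk_nil_bne]
  | cons x r ih =>
      by_cases hq : x = '"'
      · subst hq
        rw [List.dropWhile_cons_of_neg (by decide), gTok_quote,
            List.takeWhile_cons_of_neg (by decide), spTail_cons_self]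
        show _ = filtNE (List.map String.ofList (spTail ' ' []) ++ _)
        rw [show spTail ' ' [] = [] from rfl]
        simp
      · by_cases hs : x = ' '
        · subst hs
          rw [List.dropWhile_cons_of_neg (by decide), gTok_space,
              takeWhile_cons_ne _ _ _ (by decide), spTail_cons_self,
              spTail_cons_ne _ _ _ (by decide)]
          unfold gTok
          rw [sp_eq '"' r]
          simp only [toksSeg, segToks, if_neg (by decide : ¬ (false = true)),
            if_pos (rfl : (true : Bool) = true), List.append_nil]
          rw [sp_eq ' ' (List.takeWhile (fun x => x != '"') r)]
          simp [toksSeg, segToks]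
        · rw [List.dropWhile_cons_of_pos (by simp [hq, hs]),
              takeWhile_cons_ne _ _ _ hq, spTail_cons_ne _ _ _ hs,
              spTail_cons_ne _ _ _ hq]
          exact ih

theorem key (l : List Char) : filtNE (tokA l) = filtNE (gTok l) := by
  induction l using tokA.induct with
  | case1 =>
      have e1 : ∀ c : Char, spTail c ([] : List Char) = [] := fun _ => rfl
      simp [tokA, gTok, sp_eq, e1, toksSeg, segToks, filtNE, mk_nil_bne]
  | case2 rest ih =>
      rw [tokA]
      rw [if_pos rfl, gTok_quote, toksSeg_true_sp]
      have ht : filtNE (tokA ((rest.dropWhile (fun x => x != '\"')).drop 1))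
          = filtNE (toksSeg false (spTail '\"' rest)) := by
        unfold spTail
        cases h : rest.dropWhile (fun x => x != '\"') with
        | nil => simp [tokA, toksSeg, filtNE]
        | cons hd u =>
            rw [h] at ih
            exact ih
      simp only [filtNE, List.filter_cons] at ht ⊢
      rw [ht]
  | case3 rest h ih =>
      rw [tokA, if_neg (by decide), if_pos rfl, gTok_space]
      exact ih
  | case4 c rest h1 h2 ih =>
      rw [tokA, if_neg h1, if_neg h2]
      unfold gTok
      rw [sp_eq '\"' (c :: rest), takeWhile_cons_ne _ _ _ h1, spTail_cons_ne _ _ _ h1]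
      simp only [toksSeg, segToks, if_neg (by decide : ¬ (false = true))]
      rw [sp_eq ' ' (c :: rest.takeWhile (fun x => x != '\"')),
          takeWhile_cons_ne _ _ _ h2, spTail_cons_ne _ _ _ h2,
          List.takeWhile_takeWhile]
      have hpred : (fun a => decide ((a != ' ') = true ∧ (a != '\"') = true))
          = (fun x => x != ' ' && x != '\"') := by
        funext a
        by_cases ha : a = ' ' <;> by_cases hb : a = '\"' <;> simp [ha, hb]
      rw [hpred]
      have ht := ih.trans (tailsplit rest)
      simp only [filtNE] at ht
      simp [List.filter_cons, mk_cons_bne, Bool.not_false, filtNE, ht]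

theorem parse_boolean_search_spec : Claim_equal_parse_boolean_search := by
  intro query _
  unfold Spec_parse_boolean_search parse_boolean_search parse_boolean_search_alt
  by_cases h : PySem.Str.strip query = ""
  · simp [h]
  · have hq : ¬ query = "" := by
      intro hq; rw [hq] at h; exact h rfl
    rw [if_neg (by tauto), if_neg h]
    have hk := key (PySem.Str.strip query).toList
    simp only [filtNE] at hk
    have hg : toksSeg false (pySplitChar '\"' (PySem.Str.strip query).toList)
        = gTok (PySem.Str.strip query).toList := rfl
    rw [foldB_eq, hg, ← foldl_filter_ne, hk, foldl_filter_ne]
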